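-- pv_equiv track=rewrite | github.com/hanbeej/programmers | code/힙/더 맵게.py | solution
-- ===== SOURCE A (Python) =====
-- import heapq
--
-- def solution(scoville, K):
--     check=0
--     heapq.heapify(scoville)
--     while(scoville[0]<=K):
--         heapq.heappush(scoville,heapq.heappop(scoville)+(heapq.heappop(scoville)*2))
--         check=check+1
--         if(len(scoville)<=1 and scoville[0]<K):
--             check=-1
--             break
--     return check
-- ===== SOURCE B (Python) =====
-- def solution(scoville, K):
--     # Sorted-list maintenance instead of a heap: sort once, then repeatedly
--     # take the two smallest from the front and insert the mix back in order.
--     # (Does not mutate the input list; A heapifies it in place.)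
--     xs = sorted(scoville)
--     check = 0
--     while xs[0] <= K:
--         a = xs.pop(0)
--         b = xs.pop(0)
--         v = a + 2 * b
--         i = 0
--         n = len(xs)
--         while i < n and xs[i] < v:
--             i += 1
--         xs.insert(i, v)
--         check += 1
--         if len(xs) <= 1 and xs[0] < K:
--             return -1
--     return check
-- ===== Notes on version B (the rewrite author's own statement) =====
-- stated objective: alternative
-- what changed: Replaces heapq's binary heap with a plainly-maintained sorted list: sort once up front, then pop the two smallest from the front and insert the mix back in order by a linear scan; it trades O(log n) heap operations for O(n) list maintenance in exchange for dropping heapq entirely and not mutating the caller's list.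
import Mathlib
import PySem

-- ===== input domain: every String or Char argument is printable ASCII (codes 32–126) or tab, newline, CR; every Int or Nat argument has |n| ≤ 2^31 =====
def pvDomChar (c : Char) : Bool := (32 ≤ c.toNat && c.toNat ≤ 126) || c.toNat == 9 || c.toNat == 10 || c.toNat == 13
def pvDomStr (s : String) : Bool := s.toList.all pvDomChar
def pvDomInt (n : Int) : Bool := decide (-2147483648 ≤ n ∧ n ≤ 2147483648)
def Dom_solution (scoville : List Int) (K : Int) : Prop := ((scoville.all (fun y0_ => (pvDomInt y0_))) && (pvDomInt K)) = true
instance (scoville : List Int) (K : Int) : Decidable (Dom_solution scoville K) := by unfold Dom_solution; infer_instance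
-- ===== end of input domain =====

-- B replaces A's heapq with one initial sort plus ordered re-insertion of each mix
-- (objective: alternative decomposition, not faster). Return-value equivalence only:
-- A heapifies the caller's list in place, B leaves it untouched.

-- ===== PORT A =====
-- heapq is modelled by its documented contract: the list is the multiset it stores,
-- heappop removes and returns the SMALLEST item, heappush adds an item; the heap's
-- internal array layout is never observable in the returned `check`.
def pvHeapPop (heap : List Int) : Option (Int × List Int) :=
  match heap.min? with
  | none => none                      -- pop/index on an empty heap: IndexError
  | some m => some (m, heap.erase m)

def pvLoopA (K : Int) : Nat → List Int → Int → Int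
  | 0, _, check => check
  | fuel+1, heap, check =>
    match pvHeapPop heap with
    | none => check                   -- scoville[0] on empty list: IndexError (outside Pre_)
    | some (m1, r1) =>
      if m1 ≤ K then                  -- while scoville[0] <= K  (scoville[0] is the heap minimum)
        match pvHeapPop r1 with
        | none => check               -- second heappop on empty heap: IndexError (outside Pre_)
        | some (m2, r2) =>
          let heap' := r2 ++ [m1 + m2 * 2]            -- heappush(heappop + heappop*2)
          if heap'.length ≤ 1 ∧ heap'.headD 0 < K then -1   -- check=-1; break
          else pvLoopA K fuel heap' (check + 1)
      else check

def solution (scoville : List Int) (K : Int) : Int :=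
  pvLoopA K (scoville.length + 1) scoville 0

-- ===== PORT B =====
def pvInsertSorted (v : Int) : List Int → List Int
  | [] => [v]
  | y :: ys => if y < v then y :: pvInsertSorted v ys else v :: y :: ys

def pvLoopB (K : Int) : Nat → List Int → Int → Int
  | 0, _, check => check
  | fuel+1, xs, check =>
    match xs with
    | [] => check                     -- xs[0] on empty list: IndexError (outside Pre_)
    | a :: rest =>
      if a ≤ K then                   -- while xs[0] <= K
        match rest with
        | [] => check                 -- second pop on empty list: IndexError (outside Pre_)
        | b :: rest2 =>
          let xs' := pvInsertSorted (a + 2 * b) rest2     -- linear-scan ordered insert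
          if xs'.length ≤ 1 ∧ xs'.headD 0 < K then -1     -- return -1
          else pvLoopB K fuel xs' (check + 1)
      else check

def solution_alt (scoville : List Int) (K : Int) : Int :=
  pvLoopB K (scoville.length + 1) (scoville.mergeSort (fun a b => decide (a ≤ b))) 0

-- ===== PRECONDITION & SPEC =====
-- Pre_ excludes exactly the inputs on which the Python A raises IndexError: an empty
-- list, a lone element ≤ K, and lists whose full mixing (the K-independent process of
-- always combining the two smallest values, m1 + 2*m2) keeps every intermediate
-- minimum ≤ K and ends at exactly K (there A pops from a heap that has run empty).
def pvMixStep (xs : List Int) : List Int :=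
  match xs.min? with
  | none => xs
  | some m =>
    match (xs.erase m).min? with
    | none => xs
    | some m2 => ((xs.erase m).erase m2) ++ [m + 2 * m2]

-- the minimum of each state of size ≥ 2 along the full mixing, an intrinsic quantity of the input
def pvMixMins : Nat → List Int → List Int
  | 0, _ => []
  | fuel+1, xs => if xs.length ≤ 1 then [] else xs.min?.getD 0 :: pvMixMins fuel (pvMixStep xs)

-- the single value the full mixing ends at, an intrinsic quantity of the input
def pvMixLast : Nat → List Int → Int
  | 0, xs => xs.headD 0
  | fuel+1, xs => if xs.length ≤ 1 then xs.headD 0 else pvMixLast fuel (pvMixStep xs)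

def Pre_solution (scoville : List Int) (K : Int) : Prop :=
  scoville ≠ [] ∧
  ¬(scoville.length = 1 ∧ scoville.headD 0 ≤ K) ∧
  ¬(2 ≤ scoville.length ∧ (∀ m ∈ pvMixMins scoville.length scoville, m ≤ K) ∧
      pvMixLast scoville.length scoville = K)
instance (scoville : List Int) (K : Int) : Decidable (Pre_solution scoville K) := by
  unfold Pre_solution; infer_instance

def pvWitness_solution : List Int × Int := ([1, 2, 3, 9, 10, 12], 7)

def Spec_solution (scoville : List Int) (K : Int) (out : Int) : Prop := out = solution_alt scoville K
instance (scoville : List Int) (K : Int) (out : Int) : Decidable (Spec_solution scoville K out) := by unfold Spec_solution; infer_instance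

-- ===== CLAIM (what is proved, stated in full; the proofs are below) =====
def Claim_equal_solution : Prop := ∀ (scoville : List Int) (K : Int), Dom_solution scoville K → Pre_solution scoville K → Spec_solution scoville K (solution scoville K)

-- ===== LEMMAS AND PROOFS =====

theorem pvMin?_perm_sorted {heap : List Int} {a : Int} {rest : List Int}
    (hp : heap.Perm (a :: rest)) (hs : List.Pairwise (· ≤ ·) (a :: rest)) :
    heap.min? = some a := by
  rw [List.min?_eq_some_iff]
  refine ⟨hp.mem_iff.mpr (List.mem_cons_self), ?_⟩
  intro b hb
  rcases List.mem_cons.mp (hp.mem_iff.mp hb) with h | h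
  · exact h ▸ le_refl a
  · exact (List.pairwise_cons.mp hs).1 b h

theorem pvInsertSorted_eq (v : Int) : ∀ xs : List Int,
    pvInsertSorted v xs = List.orderedInsert (· ≤ ·) v xs
  | [] => rfl
  | y :: ys => by
    simp only [pvInsertSorted, List.orderedInsert]
    by_cases h : y < v
    · rw [if_pos h, if_neg (not_le.mpr h), pvInsertSorted_eq v ys]
    · rw [if_neg h, if_pos (not_lt.mp h)]

theorem pvLoop_eq (K : Int) : ∀ (fuel : Nat) (heap xs : List Int) (check : Int),
    heap.Perm xs → List.Pairwise (· ≤ ·) xs →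
    pvLoopA K fuel heap check = pvLoopB K fuel xs check := by
  intro fuel
  induction fuel with
  | zero => intro _ _ _ _ _; rfl
  | succ n ih =>
    intro heap xs check hp hs
    match xs with
    | [] =>
      have hnil : heap = [] := hp.eq_nil
      subst hnil
      simp [pvLoopA, pvLoopB, pvHeapPop]
    | a :: rest =>
      have hmin : heap.min? = some a := pvMin?_perm_sorted hp hs
      have hp1 : (heap.erase a).Perm rest := by
        have := hp.erase a
        rwa [List.erase_cons_head _ _] at this
      have hsrest : List.Pairwise (· ≤ ·) rest := (List.pairwise_cons.mp hs).2
      simp only [pvLoopA, pvLoopB, pvHeapPop, hmin]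
      by_cases hK : a ≤ K
      · rw [if_pos hK, if_pos hK]
        match rest with
        | [] =>
          have : heap.erase a = [] := hp1.eq_nil
          simp [this]
        | b :: rest2 =>
          have hmin2 : (heap.erase a).min? = some b := pvMin?_perm_sorted hp1 hsrest
          have hp2 : ((heap.erase a).erase b).Perm rest2 := by
            have := hp1.erase b
            rwa [List.erase_cons_head _ _] at this
          simp only [hmin2]
          set v := a + b * 2 with hv
          have hv2 : a + 2 * b = v := by rw [hv]; ring
          set heap' := (heap.erase a).erase b ++ [v] with hheap'
          set xs' := pvInsertSorted (a + 2 * b) rest2 with hxs'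
          have hperm' : heap'.Perm xs' := by
            rw [hxs', hv2, pvInsertSorted_eq]
            exact ((hp2.append_right [v]).trans (List.perm_append_singleton v rest2)).trans
              (List.perm_orderedInsert _ v rest2).symm
          have hsorted' : List.Pairwise (· ≤ ·) xs' := by
            rw [hxs', hv2, pvInsertSorted_eq]
            exact List.Pairwise.orderedInsert v rest2 (List.pairwise_cons.mp hsrest).2
          have hlen : heap'.length = xs'.length := hperm'.length_eq
          by_cases hL : xs'.length ≤ 1
          · -- both lists are the same singleton, so the break guard coincides
            have hx1 : xs'.length = 1 := by
              have : 0 < xs'.length := by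
                rw [← hlen, hheap', List.length_append]; simp
              omega
            obtain ⟨w, hw⟩ := List.length_eq_one_iff.mp hx1
            have hh : heap' = [w] := List.perm_singleton.mp (hw ▸ hperm')
            rw [hh, hw]
            by_cases hwK : w < K
            · rw [if_pos ⟨by simp, by simpa using hwK⟩, if_pos ⟨by simp, by simpa using hwK⟩]
            · rw [if_neg (by simp [hwK]), if_neg (by simp [hwK])]
              exact ih [w] [w] (check + 1) (List.Perm.refl _) (by simp)
          · rw [if_neg (by rw [hlen]; exact fun h => hL h.1), if_neg (fun h => hL h.1)]
            exact ih heap' xs' (check + 1) hperm' hsorted'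
      · rw [if_neg hK, if_neg hK]

theorem pvSolution_eq (scoville : List Int) (K : Int) :
    solution scoville K = solution_alt scoville K := by
  unfold solution solution_alt
  rw [← (scoville.mergeSort_perm (fun a b => decide (a ≤ b))).length_eq]
  refine pvLoop_eq K _ _ _ 0 (scoville.mergeSort_perm _).symm ?_
  have := List.pairwise_mergeSort (le := fun a b : Int => decide (a ≤ b))
    (fun a b c => by simpa using le_trans) (fun a b => by simpa using le_total a b) scoville
  exact this.imp (fun h => by simpa using h)

-- ===== VERDICT (by name: the statement is the Claim_ definition above) =====
theorem solution_spec : Claim_equal_solution := by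
  intro scoville K _ _
  unfold Spec_solution
  exact pvSolution_eq scoville K
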